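-- pv_equiv track=rewrite | github.com/polyeval/g-transeval | TestRunner/code/gen_test_file.py | reformat_input
-- ===== SOURCE A (Python) =====
-- def reformat_input(code,lang):
--     if lang == "ruby" or lang == "go":
--         return code.replace("NEW_LINE", "\n")
--     elif lang == "php":
--         return code.replace("$ ", "$")
--     elif lang == "python":
--         code_lines = [line.strip() for line in code.split("NEW_LINE")]
--         new_code_lines = []
--         indent_num = 0
--         for line in code_lines:
--             while line[0:6] == "INDENT" or line[0:6] == "DEDENT":
--                 if line[0:6] == "INDENT":
--                     line = line[6:].strip()
--                     indent_num += 1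
--                 if line[0:6] == "DEDENT":
--                     line = line[6:].strip()
--                     indent_num -= 1
--             line = " " * (4 * indent_num) + line
--             new_code_lines.append(line)
--         return "\n".join(new_code_lines)
--     return code
-- ===== SOURCE B (Python) =====
-- def _split_markers(s):
--     """Recursively consume leading INDENT/DEDENT markers of an already-stripped
--     line, returning (net indent delta, remaining content)."""
--     if s.startswith("INDENT"):
--         d, rest = _split_markers(s[6:].strip())
--         return d + 1, rest
--     if s.startswith("DEDENT"):
--         d, rest = _split_markers(s[6:].strip())
--         return d - 1, rest
--     return 0, s
--
--
-- def reformat_input(code, lang):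
--     if lang == "ruby" or lang == "go":
--         return code.replace("NEW_LINE", "\n")
--     if lang == "php":
--         return code.replace("$ ", "$")
--     if lang != "python":
--         return code
--     parsed = [_split_markers(raw.strip()) for raw in code.split("NEW_LINE")]
--     pieces = []
--     indent = 0
--     for delta, content in parsed:
--         indent += delta
--         pieces.append(" " * (4 * indent) + content)
--     return "\n".join(pieces)
-- ===== Notes on version B (the rewrite author's own statement) =====
-- stated objective: alternative
-- what changed: The python branch's stateful while-loop that mutates line and indent_num in place is replaced by a recursive marker-splitter computing a per-line (indent delta, content) pair, followed by a separate accumulation pass; the language dispatch becomes early returns.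
import Mathlib
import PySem

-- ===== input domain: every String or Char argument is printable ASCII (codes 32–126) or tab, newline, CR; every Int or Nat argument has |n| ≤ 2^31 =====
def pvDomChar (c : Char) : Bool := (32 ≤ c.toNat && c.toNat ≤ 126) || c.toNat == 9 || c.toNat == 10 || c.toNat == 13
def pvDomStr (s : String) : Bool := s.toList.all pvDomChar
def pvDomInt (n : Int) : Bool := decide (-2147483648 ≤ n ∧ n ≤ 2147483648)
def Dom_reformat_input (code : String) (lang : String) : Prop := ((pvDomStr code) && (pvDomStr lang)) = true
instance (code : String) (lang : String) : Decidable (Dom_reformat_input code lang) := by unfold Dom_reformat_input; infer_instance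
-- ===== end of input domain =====

-- B replaces A's stateful while-loop over each line by a recursive (delta, content)
-- marker-splitter plus a separate accumulation pass (objective: alternative).

-- ===== PORT A =====
-- s[0:6] = PySem.List.slice s (some 0) (some 6); s[6:] = PySem.List.slice s (some 6) none (exact).

-- termination helper for both ports: consuming a 6-char marker then stripping shrinks the line
theorem pvStripDropLt (s : List Char) (h6 : 6 ≤ s.length) :
    (PySem.Chars.strip (PySem.List.slice s (some 6) none)).length < s.length := by
  rw [PySem.List.slice_from s (by norm_num)]
  have h1 : (PySem.Chars.lstrip (s.drop (Int.toNat 6))).length ≤ (s.drop (Int.toNat 6)).length :=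
    List.length_dropWhile_le _ _
  have h2 : (PySem.Chars.strip (s.drop (Int.toNat 6))).length
      ≤ (PySem.Chars.lstrip (s.drop (Int.toNat 6))).length := by
    simpa [PySem.Chars.strip, PySem.Chars.rstrip] using
      List.length_dropWhile_le PySem.Chars.isspace (PySem.Chars.lstrip (s.drop (Int.toNat 6))).reverse
  have h3 : (s.drop (Int.toNat 6)).length = s.length - 6 := by simp
  omega

theorem pvSlice06Len {s p : List Char} (hp : p.length = 6)
    (h : PySem.List.slice s (some 0) (some 6) = p) : 6 ≤ s.length := by
  have : (PySem.List.slice s (some 0) (some 6)).length = 6 := by rw [h, hp]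
  simp [pysem] at this
  omega

-- the while-loop of A's python branch, with its two sequential if-blocks expanded
def pvWhileA (line : List Char) (ind : Int) : List Char × Int :=
  if h1 : PySem.List.slice line (some 0) (some 6) = "INDENT".toList then
    if h2 : PySem.List.slice (PySem.Chars.strip (PySem.List.slice line (some 6) none)) (some 0) (some 6) = "DEDENT".toList then
      pvWhileA (PySem.Chars.strip (PySem.List.slice (PySem.Chars.strip (PySem.List.slice line (some 6) none)) (some 6) none)) (ind + 1 - 1)
    else
      pvWhileA (PySem.Chars.strip (PySem.List.slice line (some 6) none)) (ind + 1)
  else if h3 : PySem.List.slice line (some 0) (some 6) = "DEDENT".toList then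
    pvWhileA (PySem.Chars.strip (PySem.List.slice line (some 6) none)) (ind - 1)
  else (line, ind)
termination_by line.length
decreasing_by
  · have hl : 6 ≤ line.length := pvSlice06Len (by decide) h1
    have hl1 := pvStripDropLt line hl
    have h6 := pvSlice06Len (by decide) h2
    have := pvStripDropLt _ h6
    omega
  · exact pvStripDropLt line (pvSlice06Len (by decide) h1)
  · exact pvStripDropLt line (pvSlice06Len (by decide) h3)

-- A's loop body: run the while-loop on the line, then append the indented line
def pvLineA (st : List (List Char) × Int) (line : List Char) : List (List Char) × Int :=
  let r := pvWhileA line st.2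
  (st.1 ++ [PySem.List.pyRepeat [' '] (4 * r.2) ++ r.1], r.2)

def reformat_input (code : String) (lang : String) : String :=
  if lang == "ruby" || lang == "go" then PySem.Str.replace code "NEW_LINE" "\n"
  else if lang == "php" then PySem.Str.replace code "$ " "$"
  else if lang == "python" then
    let code_lines := (PySem.Chars.splitOn code.toList "NEW_LINE".toList).map PySem.Chars.strip
    let res := code_lines.foldl pvLineA ([], 0)
    String.ofList (PySem.Chars.join ['\n'] res.1)
  else code

-- ===== PORT B =====
-- _split_markers: recursively consume leading INDENT/DEDENT markers, return (delta, content)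
def pvSplitMarkers (s : List Char) : Int × List Char :=
  if hi : PySem.Chars.startswith s "INDENT".toList = true then
    let r := pvSplitMarkers (PySem.Chars.strip (PySem.List.slice s (some 6) none))
    (r.1 + 1, r.2)
  else if hd : PySem.Chars.startswith s "DEDENT".toList = true then
    let r := pvSplitMarkers (PySem.Chars.strip (PySem.List.slice s (some 6) none))
    (r.1 - 1, r.2)
  else (0, s)
termination_by s.length
decreasing_by
  · refine pvStripDropLt s ?_
    have := (PySem.Chars.startswith_iff s "INDENT".toList).mp hi
    have := this.length_le
    simpa using this
  · refine pvStripDropLt s ?_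
    have := (PySem.Chars.startswith_iff s "DEDENT".toList).mp hd
    have := this.length_le
    simpa using this

-- B's accumulation pass body: indent += delta; append the indented content
def pvLineB (st : List (List Char) × Int) (dc : Int × List Char) : List (List Char) × Int :=
  let ind := st.2 + dc.1
  (st.1 ++ [PySem.List.pyRepeat [' '] (4 * ind) ++ dc.2], ind)

def reformat_input_alt (code : String) (lang : String) : String :=
  if lang == "ruby" || lang == "go" then PySem.Str.replace code "NEW_LINE" "\n"
  else if lang == "php" then PySem.Str.replace code "$ " "$"
  else if lang ≠ "python" then code
  else
    let parsed := (PySem.Chars.splitOn code.toList "NEW_LINE".toList).map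
        (fun raw => pvSplitMarkers (PySem.Chars.strip raw))
    let res := parsed.foldl pvLineB ([], 0)
    String.ofList (PySem.Chars.join ['\n'] res.1)

-- ===== PRECONDITION & SPEC =====
def Spec_reformat_input (code : String) (lang : String) (out : String) : Prop := out = reformat_input_alt code lang
instance (code : String) (lang : String) (out : String) : Decidable (Spec_reformat_input code lang out) := by unfold Spec_reformat_input; infer_instance

-- ===== CLAIM (what is proved, stated in full; the proofs are below) =====
def Claim_equal_reformat_input : Prop := ∀ (code : String) (lang : String), Dom_reformat_input code lang → Spec_reformat_input code lang (reformat_input code lang)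

-- ===== LEMMAS AND PROOFS =====

theorem pvCond6 (s : List Char) (p : List Char) (hp : p.length = 6) :
    (PySem.List.slice s (some 0) (some 6) = p) ↔ PySem.Chars.startswith s p = true := by
  have hs : PySem.List.slice s (some 0) (some 6) = s.take 6 := by simp [pysem]
  rw [hs, PySem.Chars.startswith_iff, List.prefix_iff_eq_take, hp]
  exact ⟨fun h => h.symm, fun h => h.symm⟩

-- the heart of the equivalence: A's while-loop equals B's marker-splitter applied once
theorem pvKey : ∀ (n : Nat) (line : List Char), line.length ≤ n → ∀ ind : Int,
    pvWhileA line ind = ((pvSplitMarkers line).2, ind + (pvSplitMarkers line).1) := by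
  intro n
  induction n with
  | zero =>
    intro line hl ind
    have hnil : line = [] := List.eq_nil_of_length_eq_zero (by omega)
    subst hnil
    rw [pvWhileA, pvSplitMarkers]
    rw [dif_neg (by decide), dif_neg (by decide), dif_neg (by decide), dif_neg (by decide)]
    simp
  | succ n ih =>
    intro line hl ind
    by_cases h1 : PySem.List.slice line (some 0) (some 6) = "INDENT".toList
    · have hsw1 : PySem.Chars.startswith line "INDENT".toList = true :=
        (pvCond6 line _ (by decide)).mp h1
      have hlen : 6 ≤ line.length := pvSlice06Len (by decide) h1
      have hl1 : (PySem.Chars.strip (PySem.List.slice line (some 6) none)).length < line.length :=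
        pvStripDropLt line hlen
      rw [pvWhileA, pvSplitMarkers]
      rw [dif_pos h1, dif_pos hsw1]
      by_cases h2 : PySem.List.slice (PySem.Chars.strip (PySem.List.slice line (some 6) none)) (some 0) (some 6) = "DEDENT".toList
      · have hlen1 : 6 ≤ (PySem.Chars.strip (PySem.List.slice line (some 6) none)).length :=
          pvSlice06Len (by decide) h2
        have hsw2d : PySem.Chars.startswith (PySem.Chars.strip (PySem.List.slice line (some 6) none)) "DEDENT".toList = true :=
          (pvCond6 _ _ (by decide)).mp h2
        have hsw2i : ¬ PySem.Chars.startswith (PySem.Chars.strip (PySem.List.slice line (some 6) none)) "INDENT".toList = true := by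
          intro hc
          have := (pvCond6 _ _ (by decide)).mpr hc
          rw [h2] at this
          exact absurd this (by decide)
        rw [dif_pos h2]
        conv_rhs => rw [pvSplitMarkers]
        rw [dif_neg hsw2i, dif_pos hsw2d]
        have hlt : (PySem.Chars.strip (PySem.List.slice (PySem.Chars.strip (PySem.List.slice line (some 6) none)) (some 6) none)).length ≤ n := by
          have := pvStripDropLt _ hlen1
          omega
        rw [ih _ hlt (ind + 1 - 1)]
        simp only [Prod.mk.injEq]
        exact ⟨trivial, by ring⟩
      · rw [dif_neg h2]
        have hlt : (PySem.Chars.strip (PySem.List.slice line (some 6) none)).length ≤ n := by omega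
        rw [ih _ hlt (ind + 1)]
        simp only [Prod.mk.injEq]
        exact ⟨trivial, by ring⟩
    · by_cases h3 : PySem.List.slice line (some 0) (some 6) = "DEDENT".toList
      · have hsw3 : PySem.Chars.startswith line "DEDENT".toList = true :=
          (pvCond6 line _ (by decide)).mp h3
        have hsw1 : ¬ PySem.Chars.startswith line "INDENT".toList = true := by
          intro hc; exact h1 ((pvCond6 line _ (by decide)).mpr hc)
        have hlen : 6 ≤ line.length := pvSlice06Len (by decide) h3
        rw [pvWhileA, pvSplitMarkers]
        rw [dif_neg h1, dif_pos h3, dif_neg hsw1, dif_pos hsw3]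
        have hlt : (PySem.Chars.strip (PySem.List.slice line (some 6) none)).length ≤ n := by
          have := pvStripDropLt line hlen
          omega
        rw [ih _ hlt (ind - 1)]
        simp only [Prod.mk.injEq]
        exact ⟨trivial, by ring⟩
      · have hsw1 : ¬ PySem.Chars.startswith line "INDENT".toList = true := by
          intro hc; exact h1 ((pvCond6 line _ (by decide)).mpr hc)
        have hsw3 : ¬ PySem.Chars.startswith line "DEDENT".toList = true := by
          intro hc; exact h3 ((pvCond6 line _ (by decide)).mpr hc)
        rw [pvWhileA, pvSplitMarkers]
        rw [dif_neg h1, dif_neg h3, dif_neg hsw1, dif_neg hsw3]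
        simp

-- the two accumulation passes agree
theorem pvFold : ∀ (ls : List (List Char)) (acc : List (List Char)) (ind : Int),
    (ls.map PySem.Chars.strip).foldl pvLineA (acc, ind)
      = (ls.map (fun raw => pvSplitMarkers (PySem.Chars.strip raw))).foldl pvLineB (acc, ind) := by
  intro ls
  induction ls with
  | nil => intro acc ind; rfl
  | cons hd tl ih =>
    intro acc ind
    simp only [List.map_cons, List.foldl_cons]
    have hk := pvKey (PySem.Chars.strip hd).length (PySem.Chars.strip hd) le_rfl ind
    show List.foldl pvLineA (pvLineA (acc, ind) (PySem.Chars.strip hd)) _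
        = List.foldl pvLineB (pvLineB (acc, ind) (pvSplitMarkers (PySem.Chars.strip hd))) _
    have hstep : pvLineA (acc, ind) (PySem.Chars.strip hd)
        = pvLineB (acc, ind) (pvSplitMarkers (PySem.Chars.strip hd)) := by
      simp only [pvLineA, pvLineB, hk]
    rw [hstep, ih]

-- ===== VERDICT (by name: the statement is the Claim_ definition above) =====
theorem reformat_input_spec : Claim_equal_reformat_input := by
  intro code lang _
  unfold Spec_reformat_input reformat_input reformat_input_alt
  by_cases hr : lang = "ruby" <;> by_cases hg : lang = "go" <;>
    by_cases hp : lang = "php" <;> by_cases hpy : lang = "python" <;>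
    simp_all
  · rw [pvFold]
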